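-- pv_equiv track=rewrite | github.com/luisjo81/CE4301-ProyectoGrupal1 | PythonFiles/Compilador.py | checkRegister
-- ===== SOURCE A (Python) =====
-- escalarRegistersList = ['R0', 'R1', 'R2', 'R3', 'R4', 'R5', 'R6', 'R7', 'R8', 'R9', 'R10', 'R11', 'R12', 'R13', 'R14', 'R15', 'R16', 'R17', 'R18', 'R19', 'R20', 'R21', 'R22', 'R23', 'R24', 'R25', 'R26', 'R27', 'R28', 'R29', 'R30', 'R31']
--
-- vectorialRegistersList = ['VR0', 'VR1', 'VR2', 'VR3', 'VR4', 'VR5', 'VR6', 'VR7', 'VR8', 'VR9', 'VR10', 'VR11', 'VR12', 'VR13', 'VR14', 'VR15', 'VR16', 'VR17', 'VR18', 'VR19', 'VR20', 'VR21', 'VR22', 'VR23', 'VR24', 'VR25', 'VR26', 'VR27', 'VR28', 'VR29', 'VR30', 'VR31']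
--
-- def checkRegister(word):
--     for i in escalarRegistersList:
--         if i == word:
--             return True
--     for i in vectorialRegistersList:
--         if i == word:
--             return True
--     return False
-- ===== SOURCE B (Python) =====
-- def checkRegister(word):
--     # Parse instead of scanning register tables: optional 'V', then 'R',
--     # then a decimal numeral 0..31 without a leading zero.
--     s = word[1:] if word.startswith('V') else word
--     if not s.startswith('R'):
--         return False
--     num = s[1:]
--     if len(num) == 1:
--         return num.isdigit()
--     if len(num) == 2:
--         return ('1' <= num[0] <= '2' and num[1].isdigit()) or \
--                (num[0] == '3' and (num[1] == '0' or num[1] == '1'))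
--     return False
-- ===== Notes on version B (the rewrite author's own statement) =====
-- stated objective: simpler
-- what changed: Replaced the two 32-element table scans with a direct parse: strip an optional 'V', require 'R', and accept iff the remaining suffix is a decimal numeral 0..31 with no leading zero.
import Mathlib
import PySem

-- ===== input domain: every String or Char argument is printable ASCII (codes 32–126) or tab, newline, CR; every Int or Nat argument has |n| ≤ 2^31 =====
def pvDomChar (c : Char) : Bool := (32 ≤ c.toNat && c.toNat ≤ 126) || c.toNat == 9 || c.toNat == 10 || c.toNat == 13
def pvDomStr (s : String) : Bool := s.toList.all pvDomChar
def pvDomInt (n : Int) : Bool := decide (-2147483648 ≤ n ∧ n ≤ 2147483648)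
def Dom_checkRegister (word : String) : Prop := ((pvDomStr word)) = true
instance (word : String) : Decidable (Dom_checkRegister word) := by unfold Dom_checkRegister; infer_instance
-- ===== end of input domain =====

-- B replaces A's two 32-element table scans by a direct parse of the register name
-- (optional 'V', then 'R', then a decimal numeral 0..31 without a leading zero); objective: simpler.

-- ===== PORT A =====
def escalarRegistersList : List String :=
  ["R0", "R1", "R2", "R3", "R4", "R5", "R6", "R7", "R8", "R9", "R10", "R11", "R12", "R13", "R14", "R15", "R16", "R17", "R18", "R19", "R20", "R21", "R22", "R23", "R24", "R25", "R26", "R27", "R28", "R29", "R30", "R31"]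

def vectorialRegistersList : List String :=
  ["VR0", "VR1", "VR2", "VR3", "VR4", "VR5", "VR6", "VR7", "VR8", "VR9", "VR10", "VR11", "VR12", "VR13", "VR14", "VR15", "VR16", "VR17", "VR18", "VR19", "VR20", "VR21", "VR22", "VR23", "VR24", "VR25", "VR26", "VR27", "VR28", "VR29", "VR30", "VR31"]

-- 'for i in l: if i == word: return True' — early-returning scan over one list
def scanRegisters (l : List String) (word : String) : Bool :=
  match l with
  | [] => false
  | i :: t => if i == word then true else scanRegisters t word

def checkRegister (word : String) : Bool :=
  if scanRegisters escalarRegistersList word then true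
  else scanRegisters vectorialRegistersList word

-- ===== PORT B =====
def checkRegister_alt (word : String) : Bool :=
  let s := if PySem.Str.startswith word "V" then PySem.Str.slice word (some 1) none else word
  if !PySem.Str.startswith s "R" then false
  else
    let num := PySem.Str.slice s (some 1) none
    if PySem.Str.len num == 1 then PySem.Str.strIsdigit num
    else if PySem.Str.len num == 2 then
      -- num[0], num[1] are in range here (len num = 2), so pyGet? is always `some`
      match PySem.Str.pyGet? num 0, PySem.Str.pyGet? num 1 with
      | some c0, some c1 =>
        (decide ('1' ≤ c0) && decide (c0 ≤ '2') && PySem.Chars.isdigit c1)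
          || (c0 == '3' && (c1 == '0' || c1 == '1'))
      | _, _ => false
    else false

-- ===== PRECONDITION & SPEC =====
def Spec_checkRegister (word : String) (out : Bool) : Prop := out = checkRegister_alt word
instance (word : String) (out : Bool) : Decidable (Spec_checkRegister word out) := by unfold Spec_checkRegister; infer_instance

-- ===== CLAIM (what is proved, stated in full; the proofs are below) =====
def Claim_equal_checkRegister : Prop := ∀ (word : String), Dom_checkRegister word → Spec_checkRegister word (checkRegister word)

-- ===== LEMMAS AND PROOFS =====

-- list-level restatement of B's numeral test: one digit, or two digits making 10..31
def numOK (d : List Char) : Bool :=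
  match d with
  | [c] => PySem.Chars.isdigit c
  | [c0, c1] =>
      (decide ('1' ≤ c0) && decide (c0 ≤ '2') && PySem.Chars.isdigit c1)
        || (c0 == '3' && (c1 == '0' || c1 == '1'))
  | _ => false

-- list-level restatement of B: optional 'V', then 'R', then a valid numeral
def bcore (cs : List Char) : Bool :=
  match cs with
  | [] => false
  | [c] => if c = 'R' then numOK [] else false
  | c :: c' :: t' =>
      if c = 'V' then (if c' = 'R' then numOK t' else false)
      else if c = 'R' then numOK (c' :: t') else false

-- the 32 valid numerals, as char lists
def numLists : List (List Char) :=
  [['0'], ['1'], ['2'], ['3'], ['4'], ['5'], ['6'], ['7'], ['8'], ['9'],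
   ['1','0'], ['1','1'], ['1','2'], ['1','3'], ['1','4'], ['1','5'], ['1','6'], ['1','7'], ['1','8'], ['1','9'],
   ['2','0'], ['2','1'], ['2','2'], ['2','3'], ['2','4'], ['2','5'], ['2','6'], ['2','7'], ['2','8'], ['2','9'],
   ['3','0'], ['3','1']]

def allLists : List (List Char) :=
  numLists.map (fun d => 'R' :: d) ++ numLists.map (fun d => 'V' :: 'R' :: d)

lemma char_eq_of_toNat_eq {c d : Char} (h : c.toNat = d.toNat) : c = d :=
  Char.ext (UInt32.toNat_inj.mp h)

lemma digit_mem (c : Char) (h : PySem.Chars.isdigit c = true) :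
    c ∈ ['0','1','2','3','4','5','6','7','8','9'] := by
  simp only [PySem.Chars.isdigit, Bool.and_eq_true, decide_eq_true_eq] at h
  obtain ⟨h1, h2⟩ := h
  rw [Char.le_def, UInt32.le_iff_toNat_le] at h1 h2
  have h1' : 48 ≤ c.val.toNat := h1
  have h2' : c.val.toNat ≤ 57 := h2
  have hd : c.val.toNat = 48 ∨ c.val.toNat = 49 ∨ c.val.toNat = 50 ∨ c.val.toNat = 51 ∨
      c.val.toNat = 52 ∨ c.val.toNat = 53 ∨ c.val.toNat = 54 ∨ c.val.toNat = 55 ∨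
      c.val.toNat = 56 ∨ c.val.toNat = 57 := by omega
  rcases hd with h|h|h|h|h|h|h|h|h|h
  · rw [char_eq_of_toNat_eq (d := '0') h]; decide
  · rw [char_eq_of_toNat_eq (d := '1') h]; decide
  · rw [char_eq_of_toNat_eq (d := '2') h]; decide
  · rw [char_eq_of_toNat_eq (d := '3') h]; decide
  · rw [char_eq_of_toNat_eq (d := '4') h]; decide
  · rw [char_eq_of_toNat_eq (d := '5') h]; decide
  · rw [char_eq_of_toNat_eq (d := '6') h]; decide
  · rw [char_eq_of_toNat_eq (d := '7') h]; decide
  · rw [char_eq_of_toNat_eq (d := '8') h]; decide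
  · rw [char_eq_of_toNat_eq (d := '9') h]; decide

lemma onetwo_mem (c : Char) (h1 : '1' ≤ c) (h2 : c ≤ '2') : c ∈ ['1','2'] := by
  rw [Char.le_def, UInt32.le_iff_toNat_le] at h1 h2
  have h1' : 49 ≤ c.val.toNat := h1
  have h2' : c.val.toNat ≤ 50 := h2
  have hd : c.val.toNat = 49 ∨ c.val.toNat = 50 := by omega
  rcases hd with h|h
  · rw [char_eq_of_toNat_eq (d := '1') h]; decide
  · rw [char_eq_of_toNat_eq (d := '2') h]; decide

lemma numOK_iff (d : List Char) : numOK d = true ↔ d ∈ numLists := by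
  constructor
  · intro h
    match d with
    | [] => simp [numOK] at h
    | [c] =>
        have hm := digit_mem c (by simpa [numOK] using h)
        fin_cases hm <;> decide
    | [c0, c1] =>
        simp only [numOK, Bool.or_eq_true, Bool.and_eq_true, beq_iff_eq,
          decide_eq_true_eq] at h
        rcases h with ⟨⟨h1, h2⟩, hd⟩ | ⟨h3, h01⟩
        · have hm0 := onetwo_mem c0 h1 h2
          have hm1 := digit_mem c1 hd
          fin_cases hm0 <;> fin_cases hm1 <;> decide
        · subst h3
          rcases h01 with h | h <;> subst h <;> decide
    | c0 :: c1 :: c2 :: t => simp [numOK] at h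
  · intro h
    fin_cases h <;> decide

lemma bcore_iff (cs : List Char) : bcore cs = true ↔ cs ∈ allLists := by
  constructor
  · intro h
    match cs with
    | [] => simp [bcore] at h
    | [c] =>
        simp only [bcore] at h
        split at h
        · simp [numOK] at h
        · exact absurd h (by simp)
    | c :: c' :: t' =>
        simp only [bcore] at h
        by_cases hV : c = 'V'
        · subst hV
          rw [if_pos rfl] at h
          by_cases hR : c' = 'R'
          · subst hR
            rw [if_pos rfl] at h
            exact List.mem_append_right _ (List.mem_map_of_mem ((numOK_iff t').mp h))
          · rw [if_neg hR] at h
            exact absurd h (by simp)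
        · rw [if_neg hV] at h
          by_cases hR : c = 'R'
          · subst hR
            rw [if_pos rfl] at h
            exact List.mem_append_left _ (List.mem_map_of_mem ((numOK_iff (c' :: t')).mp h))
          · rw [if_neg hR] at h
            exact absurd h (by simp)
  · intro h
    rcases List.mem_append.mp h with h | h <;>
      obtain ⟨d, hd, rfl⟩ := List.mem_map.mp h
    · have hnum := (numOK_iff d).mpr hd
      match d with
      | [] => simp [numLists] at hd
      | e :: d' => simp [bcore, hnum]
    · have hnum := (numOK_iff d).mpr hd
      simp [bcore, hnum]

lemma scanRegisters_iff (l : List String) (w : String) :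
    scanRegisters l w = true ↔ w.toList ∈ l.map String.toList := by
  induction l with
  | nil => simp [scanRegisters]
  | cons i t ih =>
      simp only [scanRegisters, List.map_cons, List.mem_cons]
      by_cases h : i = w
      · subst h; simp
      · rw [if_neg (by simpa using h)]
        rw [ih]
        constructor
        · exact Or.inr
        · rintro (he | hm)
          · exact absurd (String.toList_inj.mp he.symm) h
          · exact hm

lemma checkRegister_iff (w : String) :
    checkRegister w = true ↔ w.toList ∈ allLists := by
  have hesc : escalarRegistersList.map String.toList = numLists.map (fun d => 'R' :: d) := by
    decide
  have hvec : vectorialRegistersList.map String.toList =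
      numLists.map (fun d => 'V' :: 'R' :: d) := by
    decide
  unfold checkRegister
  rw [allLists, List.mem_append, ← hesc, ← hvec, ← scanRegisters_iff, ← scanRegisters_iff]
  by_cases h : scanRegisters escalarRegistersList w = true <;> simp [h]

lemma slice1 (cs : List Char) :
    PySem.Str.slice (String.ofList cs) (some 1) none = String.ofList (cs.drop 1) := by
  simp only [PySem.Str.slice, PySem.Chars.slice_eq_listSlice, String.toList_ofList]
  rw [PySem.List.slice_from _ (by norm_num : (0:Int) ≤ 1)]
  norm_num

lemma startswith_ofList_cons (c : Char) (t : List Char) (p : Char) :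
    PySem.Str.startswith (String.ofList (c :: t)) (String.ofList [p]) = (p == c) := by
  simp [PySem.Str.startswith, PySem.Chars.startswith, List.isPrefixOf]

-- B's numeral branch (everything after the 'R') equals numOK
lemma inner_eq (u : List Char) :
    (if PySem.Str.len (String.ofList u) == 1 then PySem.Str.strIsdigit (String.ofList u)
     else if PySem.Str.len (String.ofList u) == 2 then
       match PySem.Str.pyGet? (String.ofList u) 0, PySem.Str.pyGet? (String.ofList u) 1 with
       | some c0, some c1 =>
         (decide ('1' ≤ c0) && decide (c0 ≤ '2') && PySem.Chars.isdigit c1)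
           || (c0 == '3' && (c1 == '0' || c1 == '1'))
       | _, _ => false
     else false) = numOK u := by
  rw [PySem.Str.len_eq, String.toList_ofList]
  match u with
  | [] => simp [numOK]
  | [c0] =>
      simp [numOK, PySem.Str.strIsdigit, PySem.Chars.strIsdigit]
  | [c0, c1] =>
      have h1 : (((2 : Nat) : Int) == 1) = false := by decide
      simp only [List.length_cons, List.length_nil, h1, Bool.false_eq_true, if_false]
      have h2 : (((2 : Nat) : Int) == 2) = true := by decide
      simp only [h2, if_true]
      simp [numOK, PySem.Str.pyGet?_eq, PySem.Chars.pyGet?_eq_listPyGet?,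
        PySem.List.pyGet?, PySem.List.pyIdx?]
  | c0 :: c1 :: c2 :: t =>
      have h1 : ((((c0 :: c1 :: c2 :: t).length : Nat) : Int) == 1) = false := by
        simp only [beq_eq_false_iff_ne, ne_eq, List.length_cons]
        intro hc
        omega
      have h2 : ((((c0 :: c1 :: c2 :: t).length : Nat) : Int) == 2) = false := by
        simp only [beq_eq_false_iff_ne, ne_eq, List.length_cons]
        intro hc
        omega
      simp only [h1, h2, Bool.false_eq_true, if_false, numOK]

lemma startswith_V_cons (c : Char) (t : List Char) :
    PySem.Str.startswith (String.ofList (c :: t)) "V" = ('V' == c) := by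
  rw [show ("V" : String) = String.ofList ['V'] from by decide]
  exact startswith_ofList_cons c t 'V'

lemma startswith_R_cons (c : Char) (t : List Char) :
    PySem.Str.startswith (String.ofList (c :: t)) "R" = ('R' == c) := by
  rw [show ("R" : String) = String.ofList ['R'] from by decide]
  exact startswith_ofList_cons c t 'R'

lemma alt_ofList (cs : List Char) :
    checkRegister_alt (String.ofList cs) = bcore cs := by
  match cs with
  | [] =>
      simp [checkRegister_alt, bcore]
  | c :: t =>
      by_cases hV : c = 'V'
      · subst hV
        simp only [checkRegister_alt, startswith_V_cons, beq_self_eq_true, if_true, slice1,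
          List.drop_one, List.tail_cons]
        match t with
        | [] =>
            simp [bcore]
        | c' :: t' =>
            rw [startswith_R_cons]
            by_cases hR : c' = 'R'
            · subst hR
              simp only [beq_self_eq_true, Bool.not_true, Bool.false_eq_true, if_false,
                List.tail_cons]
              rw [inner_eq t']
              simp [bcore]
            · have : ('R' == c') = false := beq_eq_false_iff_ne.mpr fun he => hR he.symm
              simp [this, bcore, hR]
      · have hVb : ('V' == c) = false := beq_eq_false_iff_ne.mpr fun he => hV he.symm
        simp only [checkRegister_alt, startswith_V_cons, hVb, Bool.false_eq_true, if_false,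
          startswith_R_cons]
        by_cases hR : c = 'R'
        · subst hR
          simp only [beq_self_eq_true, Bool.not_true, Bool.false_eq_true, if_false,
            slice1, List.drop_one, List.tail_cons]
          rw [inner_eq t]
          match t with
          | [] => simp [bcore]
          | c' :: t' => simp [bcore, hV]
        · have hRb : ('R' == c) = false := beq_eq_false_iff_ne.mpr fun he => hR he.symm
          simp only [hRb, Bool.not_false, if_true]
          match t with
          | [] => simp [bcore, hR]
          | c' :: t' => simp [bcore, hV, hR]

lemma checkRegister_alt_eq_bcore (w : String) :
    checkRegister_alt w = bcore w.toList := by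
  conv_lhs => rw [← String.ofList_toList (s := w)]
  exact alt_ofList w.toList

-- ===== VERDICT (by name: the statement is the Claim_ definition above) =====
theorem checkRegister_spec : Claim_equal_checkRegister := by
  intro w _
  unfold Spec_checkRegister
  rw [Bool.eq_iff_iff, checkRegister_iff, checkRegister_alt_eq_bcore, bcore_iff]
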